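-- pv_equiv track=rewrite | github.com/0x9576/pspy | P42860.py | solution
-- ===== SOURCE A (Python) =====
-- def all_A(name, visited):
--     for i in range(0, len(name)):
--         if name[i] != "A" and visited[i] == 0:
--             return False
--     return True
--
-- def solution(name):
--     answer = 0
--     size = len(name)
--     for i in range(0, size):
--         if "A" != name[i]:
--             answer += min(ord(name[i]) - ord("A"), ord("Z") - ord(name[i]) + 1)
--     pos = 0
--     visited = [0 for _ in range(0, size)]
--     visited[0] = 1
--
--     for i in range(0, len(name)):
--         if name[i] == "A":
--             visited[i] = 1
--     while 1:
--         if all_A(name, visited):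
--             return answer
--         left, right = pos, pos
--         cnt = 0
--         while 1:
--             left -= 1
--             right += 1
--             if left < 0:
--                 left = size - 1
--             if right >= size:
--                 right = 0
--             cnt += 1
--             if visited[right] == 0:
--                 visited[right] = 1
--                 answer += cnt
--                 pos = right
--                 break
--             if visited[left] == 0:
--                 visited[left] = 1
--                 answer += cnt
--                 pos = left
--                 break
--     return answer
-- ===== SOURCE B (Python) =====
-- def _ring_dist(size, pos, j):
--     d = j - pos if j >= pos else j + size - pos
--     return min(d, size - d)
--
-- def solution(name):
--     size = len(name)
--     answer = sum(min(ord(c) - 65, 91 - ord(c)) for c in name if c != 'A')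
--     remaining = {i for i in range(1, size) if name[i] != 'A'}
--     pos = 0
--     while remaining:
--         t = min(_ring_dist(size, pos, j) for j in remaining)
--         r = pos + t if pos + t < size else pos + t - size
--         if r in remaining:
--             pos = r
--         else:
--             pos = pos - t if t <= pos else pos + size - t
--         remaining.remove(pos)
--         answer += t
--     return answer
-- ===== Notes on version B (the rewrite author's own statement) =====
-- stated objective: alternative
-- what changed: B drops the visited array, the step-by-step two-pointer ring walk and the full-string all_A rescans of A; it keeps a set of remaining target indices (letters other than the first alphabet letter), picks the nearest one directly by modular ring distance (right side preferred on ties) and removes it, and computes the vertical cost with a single comprehension.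
-- outside the precondition, e.g. on solution(''): A raises IndexError, B returns 0
import Mathlib
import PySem

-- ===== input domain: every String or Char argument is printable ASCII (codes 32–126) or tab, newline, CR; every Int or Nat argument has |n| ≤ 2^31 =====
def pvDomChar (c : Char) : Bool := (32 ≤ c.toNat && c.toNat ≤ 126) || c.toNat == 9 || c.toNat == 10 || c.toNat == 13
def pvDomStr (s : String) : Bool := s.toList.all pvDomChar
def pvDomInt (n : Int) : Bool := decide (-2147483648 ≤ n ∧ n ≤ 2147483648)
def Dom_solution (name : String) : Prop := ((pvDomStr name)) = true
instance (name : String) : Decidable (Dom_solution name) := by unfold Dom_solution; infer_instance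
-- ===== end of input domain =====

-- B replaces A's step-by-step ring walk and full-array rescans by a set of remaining
-- target indices and a direct modular-distance minimisation (objective: alternative).

-- ===== PORT A =====
-- all_A: scan every index, fail on a non-'A' unvisited one
def allA (s : List Char) (v : List Nat) : Bool :=
  (List.range s.length).all (fun i => !((s.getD i 'A' != 'A') && (v.getD i 0 == 0)))

-- A's inner `while 1` ring walk (fuel-guarded for totality; never exhausted on runs
-- reachable from `solution`): returns (visited', cnt, pos)
def walkA (v : List Nat) (size : Nat) : Nat → Nat → Nat → Nat → (List Nat × Nat × Nat)
  | 0, _l, r, c => (v, c, r)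
  | fuel+1, l, r, c =>
    let l' := if l = 0 then size - 1 else l - 1
    let r' := if r + 1 ≥ size then 0 else r + 1
    let c' := c + 1
    if v.getD r' 0 = 0 then (v.set r' 1, c', r')
    else if v.getD l' 0 = 0 then (v.set l' 1, c', l')
    else walkA v size fuel l' r' c'

-- A's outer `while 1` loop (fuel-guarded; `size` rounds always suffice)
def outerA (s : List Char) : Nat → List Nat → Nat → Int → Int
  | 0, _, _, ans => ans
  | fuel+1, v, pos, ans =>
    if allA s v then ans
    else
      let res := walkA v s.length s.length pos pos 0
      outerA s fuel res.1 res.2.2 (ans + (res.2.1 : Int))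

def solution (name : String) : Int :=
  let s := name.toList
  let size := s.length
  let answer := (List.range size).foldl
    (fun a i => if s.getD i 'A' != 'A'
      then a + min (((s.getD i 'A').toNat : Int) - 65) (90 - ((s.getD i 'A').toNat : Int) + 1)
      else a) 0
  let v0 := (List.replicate size 0).set 0 1
  let v1 := (List.range size).foldl (fun v i => if s.getD i 'A' == 'A' then v.set i 1 else v) v0
  outerA s size v1 0 answer

-- ===== PORT B =====
-- ring distance between pos and j on a cycle of length size
def ringDist (size pos j : Nat) : Nat :=
  let d := if j ≥ pos then j - pos else j + size - pos
  min d (size - d)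

-- B's while-loop: pick the nearest remaining index directly (right preferred on ties)
-- (fuel-guarded for totality; `size` rounds always suffice)
def loopB (size : Nat) : Nat → List Nat → Nat → Int → Int
  | 0, _, _, ans => ans
  | fuel+1, R, pos, ans =>
    match R with
    | [] => ans
    | x :: xs =>
      let t := xs.foldl (fun m j => min m (ringDist size pos j)) (ringDist size pos x)
      let r := if pos + t < size then pos + t else pos + t - size
      let j := if r ∈ (x :: xs) then r else (if t ≤ pos then pos - t else pos + size - t)
      loopB size fuel ((x :: xs).erase j) j (ans + (t : Int))

def solution_alt (name : String) : Int :=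
  let s := name.toList
  let size := s.length
  let answer := (s.filter (fun c => c != 'A')).foldl
    (fun a c => a + min ((c.toNat : Int) - 65) (91 - (c.toNat : Int))) 0
  let R := (List.range size).filter (fun i => decide (1 ≤ i) && (s.getD i 'A' != 'A'))
  loopB size size R 0 answer

-- ===== PRECONDITION & SPEC =====
-- Pre_ excludes only the empty string, on which A raises IndexError (visited[0] = 1).
def Pre_solution (name : String) : Prop := name ≠ ""
instance (name : String) : Decidable (Pre_solution name) := by unfold Pre_solution; infer_instance
def pvWitness_solution : String := "BAZC"

def Spec_solution (name : String) (out : Int) : Prop := out = solution_alt name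
instance (name : String) (out : Int) : Decidable (Spec_solution name out) := by unfold Spec_solution; infer_instance

-- ===== CLAIM (what is proved, stated in full; the proofs are below) =====
def Claim_equal_solution : Prop := ∀ (name : String), Dom_solution name → Pre_solution name → Spec_solution name (solution name)

-- ===== LEMMAS AND PROOFS =====

-- ring positions reached after c steps right / left from pos
def rOf (size pos c : Nat) : Nat := if pos + c < size then pos + c else pos + c - size
def lOf (size pos c : Nat) : Nat := if c ≤ pos then pos - c else pos + size - c

-- the loop invariant tying A's visited array to B's remaining set
def INVa (s : List Char) (v : List Nat) (R : List Nat) (pos : Nat) : Prop :=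
  v.length = s.length ∧ pos < s.length ∧ pos ∉ R ∧ R.Nodup ∧
  (∀ i, i ∈ R ↔ (i < s.length ∧ v.getD i 0 = 0)) ∧
  (∀ i, i ∈ R → s.getD i 'A' ≠ 'A')

lemma rOf_lt (size pos c : Nat) (hp : pos < size) (hc : c ≤ size) : rOf size pos c < size := by
  simp only [rOf]; split <;> omega

lemma lOf_lt (size pos c : Nat) (hp : pos < size) : lOf size pos c < size := by
  simp only [lOf]; split <;> omega

lemma rOf_zero (size pos : Nat) (hp : pos < size) : rOf size pos 0 = pos := by
  simp only [rOf]; split <;> omega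

lemma lOf_zero (size pos : Nat) : lOf size pos 0 = pos := by
  simp only [lOf]; split <;> omega

lemma rOf_step (size pos c : Nat) (hp : pos < size) (hc : c < size) :
    (if rOf size pos c + 1 ≥ size then 0 else rOf size pos c + 1) = rOf size pos (c+1) := by
  simp only [rOf]; split_ifs <;> omega

lemma lOf_step (size pos c : Nat) (hp : pos < size) (hc : c + 1 < size) :
    (if lOf size pos c = 0 then size - 1 else lOf size pos c - 1) = lOf size pos (c+1) := by
  simp only [lOf]; split_ifs <;> omega

lemma ringDist_rOf (size pos u : Nat) (hp : pos < size) (hu : u ≤ size) :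
    ringDist size pos (rOf size pos u) = min u (size - u) := by
  simp only [ringDist, rOf, Nat.min_def, ge_iff_le]; split_ifs <;> omega

lemma ringDist_lOf (size pos u : Nat) (hp : pos < size) (hu : u ≤ size) :
    ringDist size pos (lOf size pos u) = min u (size - u) := by
  simp only [ringDist, lOf, Nat.min_def, ge_iff_le]; split_ifs <;> omega

lemma ringDist_pos (size pos j : Nat) (hp : pos < size) (hj : j < size) (hne : j ≠ pos) :
    1 ≤ ringDist size pos j := by
  simp only [ringDist, Nat.min_def, ge_iff_le]; split_ifs <;> omega

lemma ringDist_lt (size pos j : Nat) (hp : pos < size) (hj : j < size) :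
    ringDist size pos j < size := by
  simp only [ringDist, Nat.min_def, ge_iff_le]; split_ifs <;> omega

lemma attained_cases (size pos j t : Nat) (hp : pos < size) (hj : j < size)
    (ht : ringDist size pos j = t) : j = rOf size pos t ∨ j = lOf size pos t := by
  simp only [ringDist, Nat.min_def, ge_iff_le] at ht
  simp only [rOf, lOf]
  split_ifs at ht ⊢ <;> omega

-- getD after a set, for an in-range write
lemma getD_set (v : List Nat) (j i a : Nat) (hj : j < v.length) :
    (v.set j a).getD i 0 = if i = j then a else v.getD i 0 := by
  by_cases h : i = j
  · subst h
    simp [List.getD, hj]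
  · simp [List.getD, List.getElem?_set_ne (by omega : j ≠ i), h]

-- foldl-min facts (B's `min` over the remaining set)
lemma foldl_min_le_init (f : Nat → Nat) : ∀ (xs : List Nat) (a : Nat),
    xs.foldl (fun m j => min m (f j)) a ≤ a := by
  intro xs
  induction xs with
  | nil => intro a; simp
  | cons x xs ih =>
    intro a
    calc xs.foldl (fun m j => min m (f j)) (min a (f x)) ≤ min a (f x) := ih _
      _ ≤ a := Nat.min_le_left _ _

lemma foldl_min_le_mem (f : Nat → Nat) : ∀ (xs : List Nat) (a j : Nat), j ∈ xs →
    xs.foldl (fun m j => min m (f j)) a ≤ f j := by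
  intro xs
  induction xs with
  | nil => intro a j h; simp at h
  | cons x xs ih =>
    intro a j h
    rcases List.mem_cons.mp h with h | h
    · subst h
      calc xs.foldl (fun m j => min m (f j)) (min a (f j)) ≤ min a (f j) := foldl_min_le_init f xs _
        _ ≤ f j := Nat.min_le_right _ _
    · exact ih _ j h

lemma foldl_min_att (f : Nat → Nat) : ∀ (xs : List Nat) (a : Nat),
    xs.foldl (fun m j => min m (f j)) a = a ∨ ∃ j ∈ xs, xs.foldl (fun m j => min m (f j)) a = f j := by
  intro xs
  induction xs with
  | nil => intro a; left; rfl
  | cons x xs ih =>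
    intro a
    rcases ih (min a (f x)) with h | ⟨j, hj, h⟩
    · simp only [List.foldl_cons]
      rcases Nat.le_total a (f x) with hle | hle
      · left; rw [h, Nat.min_eq_left hle]
      · right; exact ⟨x, List.mem_cons_self, by rw [h, Nat.min_eq_right hle]⟩
    · right; exact ⟨j, List.mem_cons_of_mem _ hj, h⟩

-- A's inner ring walk finds the nearest remaining index, preferring the right side.
lemma walkA_run (v : List Nat) (size pos t : Nat) (R : List Nat)
    (hp : pos < size)
    (hiff : ∀ i, i ∈ R ↔ (i < size ∧ v.getD i 0 = 0))
    (hlb : ∀ j, j ∈ R → t ≤ ringDist size pos j)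
    (hatt : rOf size pos t ∈ R ∨ lOf size pos t ∈ R)
    (ht : t < size) :
    ∀ (fuel c l r : Nat), c < t → t ≤ c + fuel → l = lOf size pos c → r = rOf size pos c →
      walkA v size fuel l r c =
        (v.set (if rOf size pos t ∈ R then rOf size pos t else lOf size pos t) 1, t,
         (if rOf size pos t ∈ R then rOf size pos t else lOf size pos t)) := by
  intro fuel
  induction fuel with
  | zero => intro c l r hc hcf _ _; omega
  | succ f ih =>
    intro c l r hc hcf hl hr
    have hc1 : c + 1 < size := by omega
    have hl' : (if l = 0 then size - 1 else l - 1) = lOf size pos (c+1) := by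
      rw [hl]; exact lOf_step size pos c hp hc1
    have hr' : (if r + 1 ≥ size then 0 else r + 1) = rOf size pos (c+1) := by
      rw [hr]; exact rOf_step size pos c hp (by omega)
    simp only [walkA, hl', hr']
    by_cases hct : c + 1 = t
    · rw [hct]
      by_cases hmem : rOf size pos t ∈ R
      · have hv : v.getD (rOf size pos t) 0 = 0 := ((hiff _).mp hmem).2
        rw [if_pos hv, if_pos hmem]
      · have hlm : lOf size pos t ∈ R := hatt.resolve_left hmem
        have hvr : ¬ v.getD (rOf size pos t) 0 = 0 := by
          intro h0
          exact hmem ((hiff _).mpr ⟨rOf_lt size pos t hp (by omega), h0⟩)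
        have hvl : v.getD (lOf size pos t) 0 = 0 := ((hiff _).mp hlm).2
        rw [if_neg hvr, if_pos hvl, if_neg hmem]
    · -- c + 1 < t : neither neighbour is remaining yet
      have hct' : c + 1 < t := by omega
      have hnr : ¬ v.getD (rOf size pos (c+1)) 0 = 0 := by
        intro h0
        have hmem : rOf size pos (c+1) ∈ R :=
          (hiff _).mpr ⟨rOf_lt size pos (c+1) hp (by omega), h0⟩
        have := hlb _ hmem
        rw [ringDist_rOf size pos (c+1) hp (by omega)] at this
        omega
      have hnl : ¬ v.getD (lOf size pos (c+1)) 0 = 0 := by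
        intro h0
        have hmem : lOf size pos (c+1) ∈ R :=
          (hiff _).mpr ⟨lOf_lt size pos (c+1) hp, h0⟩
        have := hlb _ hmem
        rw [ringDist_lOf size pos (c+1) hp (by omega)] at this
        omega
      rw [if_neg hnr, if_neg hnl]
      exact ih (c+1) _ _ hct' (by omega) rfl rfl

-- all_A is exactly "the remaining set is empty"
lemma allA_true_iff (s : List Char) (v R : List Nat)
    (hiff : ∀ i, i ∈ R ↔ (i < s.length ∧ v.getD i 0 = 0))
    (hA : ∀ i, i ∈ R → s.getD i 'A' ≠ 'A') :
    allA s v = true ↔ R = [] := by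
  constructor
  · intro h
    cases hR : R with
    | nil => rfl
    | cons x xs =>
      exfalso
      have hx : x ∈ R := by rw [hR]; exact List.mem_cons_self
      obtain ⟨hlt, hv⟩ := (hiff x).mp hx
      have hs := hA x hx
      simp only [allA, List.all_eq_true, List.mem_range] at h
      have := h x hlt
      simp only [Bool.not_eq_eq_eq_not, Bool.not_true, Bool.and_eq_false_iff, bne_eq_false_iff_eq, beq_eq_false_iff_ne] at this
      exact this.elim (fun h' => hs h') (fun h' => h' hv)
  · intro h
    simp only [allA, List.all_eq_true, List.mem_range]
    intro i hi
    by_cases hv : v.getD i 0 = 0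
    · exfalso
      have : i ∈ R := (hiff i).mpr ⟨hi, hv⟩
      rw [h] at this; simp at this
    · simp only [Bool.not_eq_eq_eq_not, Bool.not_true, Bool.and_eq_false_iff, bne_eq_false_iff_eq, beq_eq_false_iff_ne]
      right; exact hv

-- one step preserves the invariant
lemma INVa_step (s : List Char) (v R : List Nat) (pos j : Nat)
    (hinv : INVa s v R pos) (hj : j ∈ R) :
    INVa s (v.set j 1) (R.erase j) j := by
  obtain ⟨hlen, hpos, hnpos, hnd, hiff, hA⟩ := hinv
  have hjlt : j < s.length := ((hiff j).mp hj).1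
  have hjv : j < v.length := by omega
  refine ⟨by simp [hlen], hjlt, ?_, hnd.erase j, ?_, ?_⟩
  · intro h
    exact (List.Nodup.mem_erase_iff hnd).mp h |>.1 rfl
  · intro i
    rw [List.Nodup.mem_erase_iff hnd, getD_set v j i 1 hjv]
    constructor
    · rintro ⟨hne, hi⟩
      obtain ⟨hlt, hv⟩ := (hiff i).mp hi
      exact ⟨hlt, by rw [if_neg hne]; exact hv⟩
    · rintro ⟨hlt, hv⟩
      by_cases hne : i = j
      · rw [if_pos hne] at hv; omega
      · exact ⟨hne, (hiff i).mpr ⟨hlt, by rw [if_neg hne] at hv; exact hv⟩⟩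
  · intro i hi
    exact hA i (List.mem_of_mem_erase hi)

-- the main loop correspondence
lemma loop_eq (s : List Char) :
    ∀ (fuel : Nat) (v R : List Nat) (pos : Nat) (ans : Int), INVa s v R pos →
      outerA s fuel v pos ans = loopB s.length fuel R pos ans := by
  intro fuel
  induction fuel with
  | zero => intro v R pos ans _; rfl
  | succ f ih =>
    intro v R pos ans hinv
    obtain ⟨hlen, hpos, hnpos, hnd, hiff, hAc⟩ := hinv
    cases hR : R with
    | nil =>
      have hall : allA s v = true := (allA_true_iff s v R hiff hAc).mpr hR
      simp [outerA, loopB, hall]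
    | cons x xs =>
      subst hR
      have hall : allA s v = false := by
        rcases Bool.eq_false_or_eq_true (allA s v) with h | h
        · exact absurd ((allA_true_iff s v _ hiff hAc).mp h) (by simp)
        · exact h
      set size := s.length with hsize
      set t := xs.foldl (fun m j => min m (ringDist size pos j)) (ringDist size pos x) with htdef
      -- t is attained and is a lower bound on the remaining ring distances
      have hatt0 : ∃ j ∈ x :: xs, ringDist size pos j = t := by
        rcases foldl_min_att (ringDist size pos) xs (ringDist size pos x) with h | ⟨j, hj, h⟩
        · exact ⟨x, List.mem_cons_self, h.symm⟩
        · exact ⟨j, List.mem_cons_of_mem _ hj, h.symm⟩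
      have hlb : ∀ j, j ∈ x :: xs → t ≤ ringDist size pos j := by
        intro j hj
        rcases List.mem_cons.mp hj with h | h
        · subst h; exact foldl_min_le_init _ xs _
        · exact foldl_min_le_mem _ xs _ j h
      obtain ⟨j0, hj0, hj0d⟩ := hatt0
      have hj0lt : j0 < size := ((hiff j0).mp hj0).1
      have hj0ne : j0 ≠ pos := fun h => hnpos (h ▸ hj0)
      have ht1 : 1 ≤ t := hj0d ▸ ringDist_pos size pos j0 hpos hj0lt hj0ne
      have htlt : t < size := hj0d ▸ ringDist_lt size pos j0 hpos hj0lt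
      have hatt : rOf size pos t ∈ (x :: xs) ∨ lOf size pos t ∈ (x :: xs) := by
        rcases attained_cases size pos j0 t hpos hj0lt hj0d with h | h
        · left; rw [← h]; exact hj0
        · right; rw [← h]; exact hj0
      set j := if rOf size pos t ∈ (x :: xs) then rOf size pos t else lOf size pos t with hjdef
      have hjmem : j ∈ (x :: xs) := by
        rw [hjdef]; split
        · assumption
        · exact hatt.resolve_left (by assumption)
      have hwalk := walkA_run v size pos t (x :: xs) hpos hiff hlb hatt htlt
        size 0 pos pos ht1 (by omega) (lOf_zero size pos).symm (rOf_zero size pos hpos).symm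
      have hstep : outerA s (f+1) v pos ans = outerA s f (v.set j 1) j (ans + (t : Int)) := by
        simp only [outerA, hall, Bool.false_eq_true, if_false, ← hsize, hwalk, ← hjdef]
      have hB : loopB size (f+1) (x :: xs) pos ans
          = loopB size f ((x :: xs).erase j) j (ans + (t : Int)) := by
        simp only [loopB, ← htdef]
        have hrw : (if pos + t < size then pos + t else pos + t - size) = rOf size pos t := rfl
        have hlw : (if t ≤ pos then pos - t else pos + size - t) = lOf size pos t := rfl
        rw [hrw, hlw, ← hjdef]
      rw [hstep, hB]
      exact ih (v.set j 1) ((x :: xs).erase j) j (ans + (t : Int))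
        (INVa_step s v (x :: xs) pos j ⟨hlen, hpos, hnpos, hnd, hiff, hAc⟩ hjmem)

-- the marking fold: length and entries
lemma mark_length (q : Nat → Bool) : ∀ (L : List Nat) (v : List Nat),
    (L.foldl (fun v k => if q k then v.set k 1 else v) v).length = v.length := by
  intro L
  induction L with
  | nil => intro v; rfl
  | cons k L ih =>
    intro v
    simp only [List.foldl_cons]
    by_cases h : q k
    · rw [if_pos h, ih, List.length_set]
    · rw [if_neg h, ih]

lemma mark_getD (q : Nat → Bool) : ∀ (L : List Nat) (v : List Nat) (i : Nat), i < v.length →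
    ((L.foldl (fun v k => if q k then v.set k 1 else v) v).getD i 0)
      = if (i ∈ L ∧ q i) then 1 else v.getD i 0 := by
  intro L
  induction L with
  | nil => intro v i hi; simp
  | cons k L ih =>
    intro v i hi
    simp only [List.foldl_cons]
    by_cases hq : q k
    · rw [if_pos hq, ih (v.set k 1) i (by simp [hi])]
      by_cases hk : k < v.length
      · rw [getD_set v k i 1 hk]
        by_cases hiL : i ∈ L ∧ q i
        · simp [hiL, List.mem_cons]
        · by_cases hik : i = k
          · subst hik
            simp [hq, List.mem_cons]
          · simp only [if_neg hiL, if_neg hik]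
            have : ¬ ((i ∈ k :: L) ∧ q i) := by
              rintro ⟨hm, hqi⟩
              rcases List.mem_cons.mp hm with h | h
              · exact hik h
              · exact hiL ⟨h, hqi⟩
            rw [if_neg this]
      · have : v.set k 1 = v := List.set_eq_of_length_le (by omega)
        rw [this]
        by_cases hiL : i ∈ L ∧ q i
        · simp [hiL, List.mem_cons]
        · have hik : i ≠ k := by omega
          have : ¬ ((i ∈ k :: L) ∧ q i) := by
            rintro ⟨hm, hqi⟩
            rcases List.mem_cons.mp hm with h | h
            · exact hik h
            · exact hiL ⟨h, hqi⟩
          rw [if_neg hiL, if_neg this]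
    · rw [if_neg hq, ih v i hi]
      by_cases hiL : i ∈ L ∧ q i
      · simp [hiL, List.mem_cons]
      · have hik : ¬ (i = k ∧ q i) := by rintro ⟨h, hqi⟩; subst h; exact hq hqi
        have : ¬ ((i ∈ k :: L) ∧ q i) := by
          rintro ⟨hm, hqi⟩
          rcases List.mem_cons.mp hm with h | h
          · exact hik ⟨h, hqi⟩
          · exact hiL ⟨h, hqi⟩
        rw [if_neg hiL, if_neg this]

lemma base_getD (n i : Nat) (hi : i < n) :
    ((List.replicate n 0).set 0 1).getD i 0 = if i = 0 then 1 else 0 := by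
  rw [getD_set _ 0 i 1 (by simp; omega)]
  by_cases h : i = 0
  · simp [h]
  · simp [h, List.getD, hi]

-- vertical-cost folds agree
lemma foldl_range_getD (g : Int → Char → Int) : ∀ (s : List Char) (a : Int),
    (List.range s.length).foldl (fun a i => g a (s.getD i 'A')) a = s.foldl g a := by
  intro s
  induction s with
  | nil => intro a; rfl
  | cons c s ih =>
    intro a
    rw [List.length_cons, List.range_succ_eq_map, List.foldl_cons, List.foldl_map]
    simp only [List.getD_cons_zero, List.getD_cons_succ]
    exact ih (g a c)

lemma foldl_filter_add (f : Char → Int) (p : Char → Bool) : ∀ (l : List Char) (a : Int),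
    l.foldl (fun a c => if p c then a + f c else a) a = (l.filter p).foldl (fun a c => a + f c) a := by
  intro l
  induction l with
  | nil => intro a; rfl
  | cons c l ih =>
    intro a
    by_cases h : p c
    · rw [List.foldl_cons, if_pos h, List.filter_cons_of_pos h, List.foldl_cons, ih]
    · rw [List.foldl_cons, if_neg h, List.filter_cons_of_neg h, ih]

-- ===== VERDICT (by name: the statement is the Claim_ definition above) =====
theorem solution_spec : Claim_equal_solution := by
  intro name _hdom hpre
  unfold Spec_solution
  simp only [solution, solution_alt]
  set s := name.toList with hs
  have hne : s ≠ [] := by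
    rw [hs]
    simp only [ne_eq, String.toList_eq_nil_iff]
    exact hpre
  have hn : 0 < s.length := List.length_pos_iff.mpr hne
  -- vertical costs agree
  have hvert : (List.range s.length).foldl
      (fun a i => if s.getD i 'A' != 'A'
        then a + min (((s.getD i 'A').toNat : Int) - 65) (90 - ((s.getD i 'A').toNat : Int) + 1)
        else a) 0
      = (s.filter (fun c => c != 'A')).foldl
        (fun a c => a + min ((c.toNat : Int) - 65) (91 - (c.toNat : Int))) 0 := by
    rw [foldl_range_getD (fun a c => if c != 'A'
        then a + min ((c.toNat : Int) - 65) (90 - (c.toNat : Int) + 1) else a) s 0]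
    have h91 : ∀ (x : Int), 90 - x + 1 = 91 - x := by intro x; ring
    simp only [h91]
    exact foldl_filter_add (fun c => min ((c.toNat : Int) - 65) (91 - (c.toNat : Int)))
      (fun c => c != 'A') s 0
  rw [hvert]
  -- the loops agree, starting from corresponding states
  apply loop_eq s s.length _ _ 0 _
  constructor
  · rw [mark_length]
    simp
  refine ⟨hn, ?_, ?_, ?_, ?_⟩
  · simp
  · exact (List.nodup_range).filter _
  · intro i
    simp only [List.mem_filter, List.mem_range, Bool.and_eq_true, decide_eq_true_eq, bne_iff_ne]
    constructor
    · rintro ⟨hi, h1, hA⟩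
      refine ⟨hi, ?_⟩
      rw [mark_getD _ _ _ i (by simp; omega)]
      have : ¬ ((i ∈ List.range s.length) ∧ (s.getD i 'A' == 'A') = true) := by
        rintro ⟨_, h⟩
        exact hA (by simpa using h)
      rw [if_neg this, base_getD s.length i hi, if_neg (by omega)]
    · rintro ⟨hi, hv⟩
      rw [mark_getD _ _ _ i (by simp; omega)] at hv
      refine ⟨hi, ?_, ?_⟩
      · by_contra h1
        have hi0 : i = 0 := by omega
        rw [base_getD s.length i hi, if_pos hi0] at hv
        rcases ite_eq_or_eq (i ∈ List.range s.length ∧ (s.getD i 'A' == 'A') = true) (1:Nat) 1 with h | h <;> omega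
      · intro hA
        have : (i ∈ List.range s.length) ∧ (s.getD i 'A' == 'A') = true :=
          ⟨List.mem_range.mpr hi, beq_iff_eq.mpr hA⟩
        rw [if_pos this] at hv
        omega
  · intro i hi
    simp only [List.mem_filter, Bool.and_eq_true, bne_iff_ne] at hi
    exact hi.2.2
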